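-- pv_equiv track=rewrite | github.com/mesoSPIM/mesoSPIM-control | mesoSPIM/src/plugins/support_files/ImageWriters/OmeZarrWriterMP/omezarr_writer.py | plan_levels
-- ===== SOURCE A (Python) =====
-- def ceil_div(a, b):  # integer ceil
--     return -(-a // b)
--
-- def level_factors(level: int, xy_levels: int):
--     """Per-level physical scaling factors relative to level 0 for (z,y,x)."""
--     if level <= xy_levels:
--         zf = 1
--     else:
--         zf = 2 ** (level - xy_levels)
--     yf = 2 ** level
--     xf = 2 ** level
--     return zf, yf, xf
--
-- def plan_levels(y, x, z_estimate, xy_levels, min_dim=256):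
--     """Total levels given XY-only prelude, then 3D, stopping when
--        min(y_l, x_l) < min_dim or z_l < 1."""
--     L = 1
--     while True:
--         zf, yf, xf = level_factors(L, xy_levels)
--         y_l = ceil_div(y, yf)
--         x_l = ceil_div(x, xf)
--         z_l = ceil_div(z_estimate, zf)
--         if min(y_l, x_l) < min_dim or z_l < 1:
--             break
--         L += 1
--     return L
-- ===== SOURCE B (Python) =====
-- def plan_levels(y, x, z_estimate, xy_levels, min_dim=256):
--     """Total levels given XY-only prelude, then 3D, stopping when
--        min(y_l, x_l) < min_dim or z_l < 1.
--        Closed form: no halving loop."""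
--     if z_estimate < 1:
--         return 1          # z_l = z_estimate < 1 already at level 1
--     m = min(y, x)
--     if m < 1:
--         return 1          # min(y_1, x_1) <= 0 < min_dim already at level 1
--     # smallest L >= 1 with ceil(m / 2**L) < min_dim, i.e. 2**L >= ceil(m / (min_dim - 1))
--     q = -(-m // (min_dim - 1))
--     return max(1, (q - 1).bit_length())
-- ===== Notes on version B (the rewrite author's own statement) =====
-- stated objective: simpler
-- what changed: The unbounded halving while-loop is replaced by a closed form: using min(ceil(y/2^L),ceil(x/2^L)) = ceil(min(y,x)/2^L), the first level L>=1 with ceil(m/2^L) < min_dim is computed directly as max(1, (ceil(m/(min_dim-1))-1).bit_length()), with the z<1 and min(y,x)<1 cases returned as constant-time early guards.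
import Mathlib
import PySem

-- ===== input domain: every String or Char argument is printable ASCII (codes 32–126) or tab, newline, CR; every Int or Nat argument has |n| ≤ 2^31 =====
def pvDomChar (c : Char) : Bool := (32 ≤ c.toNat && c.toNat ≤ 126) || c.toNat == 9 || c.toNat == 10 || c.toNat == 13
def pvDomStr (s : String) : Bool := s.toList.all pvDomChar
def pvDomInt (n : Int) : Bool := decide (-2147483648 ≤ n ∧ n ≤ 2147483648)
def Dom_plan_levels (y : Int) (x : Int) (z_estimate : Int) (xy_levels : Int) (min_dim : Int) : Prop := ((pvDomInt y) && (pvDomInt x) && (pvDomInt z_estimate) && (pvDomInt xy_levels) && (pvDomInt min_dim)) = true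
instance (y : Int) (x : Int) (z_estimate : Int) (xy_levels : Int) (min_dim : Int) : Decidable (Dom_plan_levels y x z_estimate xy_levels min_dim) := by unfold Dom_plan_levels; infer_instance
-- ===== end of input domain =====

-- B replaces A's unbounded halving while-loop by a closed-form bit-length computation
-- of the first breaking level, with constant-time early guards for z_estimate < 1 and
-- min(y, x) < 1 (objective: simpler).

-- ===== PORT A =====
def ceil_div (a : Int) (b : Int) : Int := -(PySem.Int.floordiv (-a) b)

-- Python's 2 ** e: in A the exponents actually reached are always ≥ 1 (level starts at 1
-- and grows; in the else branch level - xy_levels ≥ 1), so `.toNat` is exact there.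
def level_factors (level : Int) (xy_levels : Int) : Int × Int × Int :=
  let zf : Int := if level ≤ xy_levels then 1 else 2 ^ (level - xy_levels).toNat
  let yf : Int := 2 ^ level.toNat
  let xf : Int := 2 ^ level.toNat
  (zf, yf, xf)

-- A's `while True` loop, made total with fuel. On every input admitted by
-- Pre_plan_levels (inside Dom) the loop breaks at some L ≤ 32 < 64, so fuel 64 is never
-- exhausted and the port is exact there; the inputs where Python's loop never breaks
-- (it diverges) are exactly the ones Pre_plan_levels excludes.
def planLoop (y : Int) (x : Int) (z_estimate : Int) (xy_levels : Int) (min_dim : Int) : Nat → Int → Int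
  | 0, L => L
  | fuel + 1, L =>
    let f := level_factors L xy_levels
    let y_l := ceil_div y f.2.1
    let x_l := ceil_div x f.2.2
    let z_l := ceil_div z_estimate f.1
    if min y_l x_l < min_dim ∨ z_l < 1 then L
    else planLoop y x z_estimate xy_levels min_dim fuel (L + 1)

def plan_levels (y : Int) (x : Int) (z_estimate : Int) (xy_levels : Int) (min_dim : Int) : Int :=
  planLoop y x z_estimate xy_levels min_dim 64 1

-- ===== PORT B =====
-- Python's (q-1).bit_length() is PySem.Int.bitLength (Python-exact, also on negatives).
def plan_levels_alt (y : Int) (x : Int) (z_estimate : Int) (xy_levels : Int) (min_dim : Int) : Int :=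
  if z_estimate < 1 then 1
  else
    let m := min y x
    if m < 1 then 1
    else
      let q := -(PySem.Int.floordiv (-m) (min_dim - 1))
      max 1 ((PySem.Int.bitLength (q - 1) : Int))

-- ===== PRECONDITION & SPEC =====
-- Pre_ admits exactly the inputs on which A's while-loop ever breaks (A returns);
-- outside it Python's A loops forever: with z_estimate ≥ 1 the z-condition never fires,
-- and the XY minimum min(ceil(y/2^L), ceil(x/2^L)) is smallest at L = 1 when
-- min(y,x) ≤ 0 (it then rises towards 0) and tends to 1 when 1 ≤ y, x.
def Pre_plan_levels (y : Int) (x : Int) (z_estimate : Int) (xy_levels : Int) (min_dim : Int) : Prop :=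
  z_estimate ≤ 0 ∨
  (min y x ≤ 0 ∧ min (-(PySem.Int.floordiv (-y) 2)) (-(PySem.Int.floordiv (-x) 2)) < min_dim) ∨
  (1 ≤ y ∧ 1 ≤ x ∧ 2 ≤ min_dim)

instance (y : Int) (x : Int) (z_estimate : Int) (xy_levels : Int) (min_dim : Int) : Decidable (Pre_plan_levels y x z_estimate xy_levels min_dim) := by unfold Pre_plan_levels; infer_instance

def pvWitness_plan_levels : Int × Int × Int × Int × Int := (1000, 1000, 50, 2, 256)

def Spec_plan_levels (y : Int) (x : Int) (z_estimate : Int) (xy_levels : Int) (min_dim : Int) (out : Int) : Prop := out = plan_levels_alt y x z_estimate xy_levels min_dim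
instance (y : Int) (x : Int) (z_estimate : Int) (xy_levels : Int) (min_dim : Int) (out : Int) : Decidable (Spec_plan_levels y x z_estimate xy_levels min_dim out) := by unfold Spec_plan_levels; infer_instance

-- ===== CLAIM (what is proved, stated in full; the proofs are below) =====
def Claim_equal_plan_levels : Prop := ∀ (y : Int) (x : Int) (z_estimate : Int) (xy_levels : Int) (min_dim : Int), Dom_plan_levels y x z_estimate xy_levels min_dim → Pre_plan_levels y x z_estimate xy_levels min_dim → Spec_plan_levels y x z_estimate xy_levels min_dim (plan_levels y x z_estimate xy_levels min_dim)

-- ===== LEMMAS AND PROOFS =====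

-- The loop condition at level L, as a Bool (proof-side abbreviation of A's test).
def pvCond (y : Int) (x : Int) (z_estimate : Int) (xy_levels : Int) (min_dim : Int) (L : Int) : Bool :=
  decide (min (ceil_div y (2 ^ L.toNat)) (ceil_div x (2 ^ L.toNat)) < min_dim) ||
  decide (ceil_div z_estimate (if L ≤ xy_levels then (1 : Int) else 2 ^ (L - xy_levels).toNat) < 1)

lemma planLoop_succ (y x z xy md : Int) (fuel : Nat) (L : Int) :
    planLoop y x z xy md (fuel + 1) L =
      if pvCond y x z xy md L then L else planLoop y x z xy md fuel (L + 1) := by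
  simp only [planLoop, level_factors, pvCond, Bool.or_eq_true, decide_eq_true_eq]
  split <;> rfl

-- The loop returns the FIRST level ≥ its start where the condition holds.
lemma planLoop_first (y x z xy md : Int) :
    ∀ (fuel : Nat) (L T : Int), L ≤ T → T < L + (fuel : Int) →
      pvCond y x z xy md T = true →
      (∀ K, L ≤ K → K < T → pvCond y x z xy md K = false) →
      planLoop y x z xy md fuel L = T := by
  intro fuel
  induction fuel with
  | zero => intro L T h1 h2 _ _; omega
  | succ n ih =>
    intro L T h1 h2 hT hno
    rw [planLoop_succ]
    by_cases hc : pvCond y x z xy md L = true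
    · rcases eq_or_lt_of_le h1 with heq | hlt
      · subst heq; rw [if_pos hc]
      · exact absurd hc (by simp [hno L le_rfl hlt])
    · have hne : L ≠ T := fun h => hc (h ▸ hT)
      simp only [hc, if_false, Bool.false_eq_true]
      exact ih (L + 1) T (by omega) (by push_cast at h2 ⊢; omega) hT
        (fun K hK1 hK2 => hno K (by omega) hK2)

-- ceiling-division brackets (b > 0)
lemma ceil_div_lt_iff {a b c : Int} (hb : 0 < b) : ceil_div a b < c ↔ a ≤ (c - 1) * b := by
  unfold ceil_div
  rw [show (-(PySem.Int.floordiv (-a) b) < c) ↔ (1 - c ≤ PySem.Int.floordiv (-a) b) from by omega,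
      PySem.Int.le_floordiv_iff_mul_le hb]
  constructor <;> intro h <;> nlinarith

lemma ceil_div_le_iff {a b c : Int} (hb : 0 < b) : ceil_div a b ≤ c ↔ a ≤ c * b := by
  unfold ceil_div
  rw [show (-(PySem.Int.floordiv (-a) b) ≤ c) ↔ (-c ≤ PySem.Int.floordiv (-a) b) from by omega,
      PySem.Int.le_floordiv_iff_mul_le hb]
  constructor <;> intro h <;> nlinarith

lemma one_le_ceil_div {a b : Int} (hb : 0 < b) (ha : 1 ≤ a) : 1 ≤ ceil_div a b := by
  unfold ceil_div
  have := (PySem.Int.floordiv_lt_iff_lt_mul (a := -a) (b := b) (q := 0) hb).mpr (by nlinarith)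
  omega

lemma ceil_div_nonpos {a b : Int} (hb : 0 < b) (ha : a ≤ 0) : ceil_div a b ≤ 0 := by
  unfold ceil_div
  have := (PySem.Int.le_floordiv_iff_mul_le (a := -a) (b := b) (q := 0) hb).mpr (by nlinarith)
  omega

-- with z ≥ 1 the z-condition never fires, and the XY test collapses onto min y x
lemma pvCond_char (y x z xy md : Int) (hz : 1 ≤ z) (L : Int) :
    pvCond y x z xy md L = true ↔ min y x ≤ (md - 1) * 2 ^ L.toNat := by
  have hzf : (0 : Int) < (if L ≤ xy then (1 : Int) else 2 ^ (L - xy).toNat) := by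
    split <;> positivity
  have hP : (0 : Int) < 2 ^ L.toNat := by positivity
  have hnz : ¬ (ceil_div z (if L ≤ xy then (1 : Int) else 2 ^ (L - xy).toNat) < 1) := by
    have := one_le_ceil_div hzf hz; omega
  simp only [pvCond, Bool.or_eq_true, decide_eq_true_eq, hnz, or_false,
    min_lt_iff, ceil_div_lt_iff hP, ← min_le_iff]

-- A stops at level 1 when the level-1 condition already holds
lemma planLoop_at_one (y x z xy md : Int) (h : pvCond y x z xy md 1 = true) :
    planLoop y x z xy md 64 1 = 1 :=
  planLoop_first y x z xy md 64 1 1 le_rfl (by norm_num) h (fun K h1 h2 => absurd h1 (by omega))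

-- ===== VERDICT (by name: the statement is the Claim_ definition above) =====
theorem plan_levels_spec : Claim_equal_plan_levels := by
  intro y x z xy md hdom hpre
  unfold Spec_plan_levels
  simp only [Dom_plan_levels, pvDomInt, Bool.and_eq_true, decide_eq_true_eq] at hdom
  obtain ⟨⟨⟨⟨hy, hx⟩, hzb⟩, hxyb⟩, hmdb⟩ := hdom
  show plan_levels y x z xy md = plan_levels_alt y x z xy md
  by_cases hz : z < 1
  · -- z_estimate < 1: both return 1
    have hzf : (0 : Int) < (if (1 : Int) ≤ xy then (1 : Int) else 2 ^ ((1 : Int) - xy).toNat) := by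
      split <;> positivity
    have hcond : pvCond y x z xy md 1 = true := by
      have := ceil_div_nonpos hzf (show z ≤ 0 by omega)
      simp only [pvCond, Bool.or_eq_true, decide_eq_true_eq]
      right; omega
    rw [plan_levels, planLoop_at_one y x z xy md hcond, plan_levels_alt, if_pos hz]
  · have hz1 : (1 : Int) ≤ z := by omega
    by_cases hm : min y x < 1
    · -- min(y,x) < 1: Pre_ forces the level-1 break; both return 1
      have hpre2 : min (ceil_div y 2) (ceil_div x 2) < md := by
        rcases hpre with h | ⟨_, h⟩ | ⟨h1, h2, _⟩
        · omega
        · exact h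
        · simp only [min_lt_iff] at hm; omega
      have hcond : pvCond y x z xy md 1 = true := by
        rw [pvCond_char y x z xy md hz1 1]
        have h2 : (0 : Int) < 2 := by norm_num
        rw [min_lt_iff, ceil_div_lt_iff h2, ceil_div_lt_iff h2, ← min_le_iff] at hpre2
        simpa using hpre2
      rw [plan_levels, planLoop_at_one y x z xy md hcond, plan_levels_alt, if_neg hz,
        if_pos hm]
    · -- main case: 1 ≤ y, x and min_dim ≥ 2; closed form vs loop
      have hmin1 : (1 : Int) ≤ min y x := by omega
      have hmd : (2 : Int) ≤ md := by
        rcases hpre with h | ⟨h, _⟩ | ⟨_, _, h⟩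
        · omega
        · omega
        · exact h
      have hmdp : (0 : Int) < md - 1 := by omega
      set m : Int := min y x with hm_def
      set q : Int := ceil_div m (md - 1) with hq_def
      have hq1 : (1 : Int) ≤ q := one_le_ceil_div hmdp hmin1
      have hqm : q ≤ m := by
        rw [hq_def, ceil_div_le_iff hmdp]; nlinarith
      have hmq : m ≤ q * (md - 1) := by
        rw [← ceil_div_le_iff hmdp]
      have hmB : m ≤ 2147483648 := by
        have : m ≤ y := min_le_left y x
        omega
      set bl : Nat := PySem.Int.bitLength (q - 1) with hbl_def
      have hqtn : (q - 1).natAbs = (q - 1).toNat := by omega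
      have hq_lt : q - 1 < (2 : Int) ^ bl := by
        have h := PySem.Int.lt_two_pow_bitLength (q - 1)
        rw [hqtn] at h
        have : ((q - 1).toNat : Int) < ((2 ^ bl : Nat) : Int) := by exact_mod_cast h
        push_cast at this; omega
      have hbl32 : bl ≤ 32 := by
        by_contra hcon
        have hq2 : (2 : Int) ≤ q := by
          by_contra h2
          have : q = 1 := by omega
          rw [this] at hbl_def
          simp [PySem.Int.bitLength_zero] at hbl_def
          omega
        have hne : q - 1 ≠ 0 := by omega
        have h := PySem.Int.two_pow_bitLength_le (q - 1) hne
        rw [hqtn, ← hbl_def] at h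
        have h33 : 33 ≤ bl := by omega
        have : 2 ^ 32 ≤ 2 ^ (bl - 1) := Nat.pow_le_pow_right (by norm_num) (by omega)
        have hle : ((2 : Nat) ^ (bl - 1) : Int) ≤ q - 1 := by
          have := h
          omega
        have : ((2 : Nat) ^ 32 : Int) ≤ ((2 : Nat) ^ (bl - 1) : Int) := by exact_mod_cast this
        have hbig : ((2 : Nat) ^ 32 : Int) ≤ q - 1 := le_trans this hle
        norm_num at hbig
        omega
      set T : Int := max 1 ((bl : Nat) : Int) with hT_def
      have hT1 : (1 : Int) ≤ T := le_max_left _ _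
      have hTtn : T.toNat = max 1 bl := by omega
      have hblT : bl ≤ T.toNat := by omega
      have hcondT : pvCond y x z xy md T = true := by
        rw [pvCond_char y x z xy md hz1 T]
        have hqP : q ≤ (2 : Int) ^ T.toNat := by
          have h1 : (2 : Int) ^ bl ≤ (2 : Int) ^ T.toNat := by
            have := Nat.pow_le_pow_right (show 1 ≤ 2 by norm_num) hblT
            exact_mod_cast this
          omega
        calc m ≤ q * (md - 1) := hmq
          _ ≤ (md - 1) * 2 ^ T.toNat := by nlinarith
      have hnoK : ∀ K, (1 : Int) ≤ K → K < T → pvCond y x z xy md K = false := by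
        intro K hK1 hKT
        have hbl2 : (2 : Int) ≤ (bl : Int) := by omega
        have hq2 : (2 : Int) ≤ q := by
          by_contra h2
          have : q = 1 := by omega
          rw [this] at hbl_def
          simp [PySem.Int.bitLength_zero] at hbl_def
          omega
        have hne : q - 1 ≠ 0 := by omega
        have hup := PySem.Int.two_pow_bitLength_le (q - 1) hne
        rw [hqtn, ← hbl_def] at hup
        have hKbl : K.toNat ≤ bl - 1 := by omega
        have h2K : (2 : Nat) ^ K.toNat ≤ 2 ^ (bl - 1) := Nat.pow_le_pow_right (by norm_num) hKbl
        have hcast : ∀ k : Nat, (((2 : Nat) ^ k : Nat) : Int) = (2 : Int) ^ k := by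
          intro k; push_cast; ring
        have hup' : (((2 : Nat) ^ (bl - 1) : Nat) : Int) ≤ q - 1 := by omega
        have h2Kq : (2 : Int) ^ K.toNat ≤ q - 1 := by
          have h2K' : (((2 : Nat) ^ K.toNat : Nat) : Int) ≤ (((2 : Nat) ^ (bl - 1) : Nat) : Int) :=
            Nat.cast_le.mpr h2K
          rw [hcast] at h2K'
          omega
        rw [← Bool.not_eq_true, pvCond_char y x z xy md hz1 K]
        intro hle
        have : q ≤ (2 : Int) ^ K.toNat := by
          rw [hq_def, ceil_div_le_iff hmdp]; nlinarith
        omega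
      have hA : plan_levels y x z xy md = T := by
        rw [plan_levels]
        exact planLoop_first y x z xy md 64 1 T hT1 (by omega) hcondT
          (fun K h1 h2 => hnoK K h1 h2)
      have hB : plan_levels_alt y x z xy md = T := by
        rw [plan_levels_alt, if_neg hz]
        simp only [← hm_def, if_neg hm]
        rw [hT_def, hbl_def, hq_def, ceil_div]
      rw [hA, hB]
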